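-- pv_equiv track=rewrite | github.com/Benjamin-Davies/plover-dictionaries | validate.py | steno_indices
-- ===== SOURCE A (Python) =====
-- STENO_ORDER = "#STKPWHRAO*EUFRPBLGTSDZ"
--
-- NUMBER_KEYS = "OSTPHAFPLT"
--
-- MIDDLE = STENO_ORDER.index("*")
--
-- def process_numbers(stroke: str) -> str:
--     """
--     Replaces numbers with the corresponding steno characters.
--     """
--     if "/" in stroke:
--         return "/".join(map(process_numbers, stroke.split("/")))
--
--     if stroke[0] == "#":
--         is_number = True
--         stroke = stroke[1:]
--     else:
--         is_number = False
--
--     for index, char in enumerate(stroke):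
--         if char.isdigit():
--             stroke = stroke[:index] + NUMBER_KEYS[int(char)] + stroke[index + 1 :]
--             is_number = True
--
--     if is_number:
--         stroke = "#" + stroke
--
--     return stroke
--
-- def steno_indices(key: str) -> list[int]:
--     """
--     Returns a list of indices for the given steno stroke.
--     """
--     key = process_numbers(key)
--     min_index = 0
--     indices = []
--     for char in key:
--         if char == "-":
--             # Skip to the middle and don't count this char.
--             min_index = MIDDLE + 1
--             continue
--
--         if char == "/":
--             # Reset the minimum index for the next stroke.
--             min_index = 0
--
--         index = STENO_ORDER.find(char, min_index)
--         indices.append(index)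
--         if index != -1:
--             min_index = index + 1
--
--     return indices
-- ===== SOURCE B (Python) =====
-- STENO_ORDER = "#STKPWHRAO*EUFRPBLGTSDZ"
--
-- NUMBER_KEYS = "OSTPHAFPLT"
--
-- MIDDLE = STENO_ORDER.index("*")
--
-- # last occurrence of each key character in steno order
-- _LAST = {c: i for i, c in enumerate(STENO_ORDER)}
--
--
-- def _step(j, c):
--     """Advance the order pointer j past c; return (new j, emitted index or None)."""
--     if c == "-":
--         return MIDDLE + 1, None
--     if _LAST.get(c, -1) >= j:
--         # c occurs at or after j: walk forward to its first occurrence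
--         while STENO_ORDER[j] != c:
--             j += 1
--         return j + 1, j
--     return j, -1
--
--
-- def steno_indices(key: str) -> list[int]:
--     indices = []
--     for k, stroke in enumerate(key.split("/")):
--         if k:
--             indices.append(-1)  # the '/' separator itself never matches a steno key
--         leading = stroke[0] == "#"
--         body = stroke[1:] if leading else stroke
--         j = 0
--         if leading or any(c.isdigit() for c in body):
--             j, idx = _step(j, "#")
--             indices.append(idx)
--         for c in body:
--             if c.isdigit():
--                 c = NUMBER_KEYS[int(c)]
--             j, idx = _step(j, c)
--             if idx is not None:
--                 indices.append(idx)
--     return indices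
-- ===== Notes on version B (the rewrite author's own statement) =====
-- stated objective: alternative
-- what changed: B never builds A's normalized string: it makes one fused pass per '/'-separated stroke, translating digits on the fly and matching each character by advancing a single order pointer with an amortized forward walk over STENO_ORDER guarded by a precomputed last-occurrence table, instead of A's two-stage process_numbers (per-digit string slicing) followed by repeated STENO_ORDER.find scans.
import Mathlib
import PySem

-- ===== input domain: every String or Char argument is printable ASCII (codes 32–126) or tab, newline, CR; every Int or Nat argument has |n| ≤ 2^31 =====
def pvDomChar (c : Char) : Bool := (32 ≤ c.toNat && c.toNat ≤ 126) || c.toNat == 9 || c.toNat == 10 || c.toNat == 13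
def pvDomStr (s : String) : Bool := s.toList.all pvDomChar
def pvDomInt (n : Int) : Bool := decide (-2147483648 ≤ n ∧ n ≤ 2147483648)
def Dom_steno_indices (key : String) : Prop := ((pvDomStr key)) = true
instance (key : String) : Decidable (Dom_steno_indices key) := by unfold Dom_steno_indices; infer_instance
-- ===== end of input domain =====

-- B fuses everything into one pass per '/'-separated stroke (no normalized string is built):
-- digits are translated on the fly and each character is matched by an amortized forward walk of a
-- single order pointer, guarded by a last-occurrence table, instead of repeated str.find scans
-- over the rebuilt string (objective: alternative).

-- shared module-level constants of both Python files
def STENO : List Char := ['#','S','T','K','P','W','H','R','A','O','*','E','U','F','R','P','B','L','G','T','S','D','Z']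
def NUMKEYS : List Char := ['O','S','T','P','H','A','F','P','L','T']
-- MIDDLE = STENO_ORDER.index("*"); '*' is present, so .index = .find
def MIDDLE : Int := PySem.Chars.find STENO ['*']

-- ===== PORT A =====
-- the digit-substitution loop of process_numbers: iterates over enumerate() of the ORIGINAL string
-- (rebinding `stroke` does not change the iterator), rebuilding the string by slicing at each digit.
-- int(char) is ported as (char code - 48), exact for ASCII digits; NUMBER_KEYS[int(char)] via pyGetD
-- (always in range for a digit).
def pnLoop (s : List Char) (isNum : Bool) : List Char × Bool :=
  (PySem.List.enumerate s 0).foldl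
    (fun st p =>
      if PySem.Chars.isdigit p.2 then
        (PySem.List.slice st.1 none (some p.1) ++
           [PySem.List.pyGetD NUMKEYS ((p.2.toNat : Int) - 48) ' '] ++
           PySem.List.slice st.1 (some (p.1 + 1)) none, true)
      else st)
    (s, isNum)

-- process_numbers on a stroke without '/'; none = IndexError from stroke[0] on the empty stroke
def pnPart (stroke : List Char) : Option (List Char) :=
  match stroke with
  | [] => none
  | c :: rest =>
    let p := if c = '#' then (true, rest) else (false, stroke)
    let r := pnLoop p.2 p.1
    some (if r.2 then '#' :: r.1 else r.1)

-- process_numbers: the recursive call on each '/'-split part always takes the no-'/' branch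
-- (split parts contain no separator), so it is pnPart there.
def pnAll (s : List Char) : Option (List Char) :=
  if PySem.Chars.isIn ['/'] s then
    ((PySem.Chars.splitOn s ['/']).mapM pnPart).map (fun ps => PySem.Chars.join ['/'] ps)
  else pnPart s

-- the body of A's loop over the characters of the processed key
def stepA (st : Int × List Int) (c : Char) : Int × List Int :=
  if c = '-' then (MIDDLE + 1, st.2)
  else
    let m := if c = '/' then 0 else st.1
    let idx := PySem.Chars.findFrom STENO [c] m none
    (if idx ≠ -1 then idx + 1 else m, st.2 ++ [idx])

def steno_indices (key : String) : List Int :=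
  match pnAll key.toList with
  | none => []          -- Python raises IndexError here; excluded by Pre_
  | some s => (s.foldl stepA (0, ([] : List Int))).2

-- ===== PORT B =====
-- _LAST = {c: i for i, c in enumerate(STENO_ORDER)}: dict comprehension, later entries overwrite
def LAST : PySem.Dict Char Int :=
  (PySem.List.enumerate STENO 0).foldl (fun d p => d.insert p.2 p.1) PySem.Dict.empty

-- the `while STENO_ORDER[j] != c: j += 1` walk of _step, as recursion on the remaining suffix
-- of STENO_ORDER (an empty suffix would be IndexError in Python; unreachable under the _LAST guard,
-- which guarantees an occurrence of c at or after j)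
def walkAux : List Char → Int → Char → Int
  | [], _, _ => -1
  | d :: rest, j, c => if d = c then j else walkAux rest (j + 1) c

-- _step(j, c): ('-' jump, guarded forward walk, or a -1 miss that leaves j unchanged)
def bStep (j : Int) (c : Char) : Int × Option Int :=
  if c = '-' then (MIDDLE + 1, none)
  else if LAST.getD c (-1) ≥ j then
    let p := walkAux (STENO.drop j.toNat) j c
    (p + 1, some p)
  else (j, some (-1))

-- the `j, idx = _step(j, c); if idx is not None: indices.append(idx)` step on the (j, indices) state
def emit (st : Int × List Int) (c : Char) : Int × List Int :=
  let r := bStep st.1 c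
  (r.1, match r.2 with | some i => st.2 ++ [i] | none => st.2)

-- one stroke of B's loop body; none = IndexError from stroke[0] on an empty stroke
def bStroke (acc : List Int) (stroke : List Char) : Option (List Int) :=
  match stroke with
  | [] => none
  | c0 :: rest =>
    let leading : Bool := c0 = '#'
    let body := if leading then rest else c0 :: rest
    let st0 : Int × List Int :=
      if leading || body.any PySem.Chars.isdigit then emit (0, acc) '#' else (0, acc)
    some (body.foldl
      (fun st c =>
        emit st (if PySem.Chars.isdigit c then
                   PySem.List.pyGetD NUMKEYS ((c.toNat : Int) - 48) ' '
                 else c))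
      st0).2

-- the outer loop over key.split("/"): `if k: indices.append(-1)` then the stroke pass
def bOuter (st : Option (Bool × List Int)) (stroke : List Char) : Option (Bool × List Int) :=
  match st with
  | none => none
  | some (first, acc) =>
    let acc' := if first then acc else acc ++ [-1]
    (bStroke acc' stroke).map (fun l => (false, l))

def steno_indices_alt (key : String) : List Int :=
  (((PySem.Chars.splitOn key.toList ['/']).foldl bOuter
      (some (true, ([] : List Int)))).map (fun p => p.2)).getD []

-- ===== PRECONDITION & SPEC =====
-- Pre_ excludes exactly the keys with an empty '/'-separated stroke (including the empty key),
-- on which both Pythons raise IndexError at stroke[0].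
def Pre_steno_indices (key : String) : Prop :=
  [] ∉ PySem.Chars.splitOn key.toList ['/']
instance (key : String) : Decidable (Pre_steno_indices key) := by
  unfold Pre_steno_indices; infer_instance
def pvWitness_steno_indices : String := "#STR/-7B/KAT"

def Spec_steno_indices (key : String) (out : List Int) : Prop := out = steno_indices_alt key
instance (key : String) (out : List Int) : Decidable (Spec_steno_indices key out) := by
  unfold Spec_steno_indices; infer_instance

-- ===== CLAIM (what is proved, stated in full; the proofs are below) =====
def Claim_equal_steno_indices : Prop :=
  ∀ (key : String), Dom_steno_indices key → Pre_steno_indices key →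
    Spec_steno_indices key (steno_indices key)

-- ===== LEMMAS AND PROOFS =====

-- splitAux c pre l : reference form of Python's split on the single-char separator c,
-- with pre the (already read) beginning of the current piece
def splitAux (c : Char) : List Char → List Char → List (List Char)
  | pre, [] => [pre]
  | pre, d :: rest => if d = c then pre :: splitAux c [] rest else splitAux c (pre ++ [d]) rest

theorem splitOn_go_eq (c : Char) (l : List Char) : ∀ (fuel : Nat) (cur : List Char)
    (acc : List (List Char)), l.length < fuel →
    PySem.Chars.splitOn.go [c] fuel l cur acc = acc.reverse ++ splitAux c cur.reverse l := by
  induction l with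
  | nil =>
    intro fuel cur acc h
    match fuel with
    | f + 1 => simp [PySem.Chars.splitOn.go, splitAux]
  | cons d rest ih =>
    intro fuel cur acc h
    match fuel with
    | f + 1 =>
      rw [PySem.Chars.splitOn.go]
      by_cases hdc : d = c
      · subst hdc
        rw [if_pos (by simp [List.isPrefixOf])]
        simp only [List.length_cons, List.drop_succ_cons, List.length_nil, List.drop_zero]
        rw [ih f [] (cur.reverse :: acc) (by simpa using h)]
        simp [splitAux]
      · rw [if_neg (by simp [List.isPrefixOf]; exact fun hh => hdc hh.symm)]
        rw [ih f (d :: cur) acc (by simpa using h)]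
        simp [splitAux, hdc]

theorem splitOn_eq (c : Char) (s : List Char) :
    PySem.Chars.splitOn s [c] = splitAux c [] s := by
  rw [PySem.Chars.splitOn, splitOn_go_eq c s (s.length+1) [] [] (by omega)]
  simp

theorem splitAux_ne_nil (c : Char) (pre l : List Char) : splitAux c pre l ≠ [] := by
  induction l generalizing pre with
  | nil => simp [splitAux]
  | cons d rest ih => by_cases h : d = c <;> simp [splitAux, h, ih]

theorem splitAux_no_sep (c : Char) (pre l : List Char) (hpre : c ∉ pre) :
    ∀ p ∈ splitAux c pre l, c ∉ p := by
  induction l generalizing pre with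
  | nil => simpa [splitAux] using hpre
  | cons d rest ih =>
    by_cases h : d = c
    · subst h
      have he : splitAux d pre (d :: rest) = pre :: splitAux d [] rest := by
        simp [splitAux]
      rw [he]
      rintro p hp
      rcases List.mem_cons.mp hp with rfl | hp2
      · exact hpre
      · exact ih [] (by simp) p hp2
    · simp only [splitAux, if_neg h]
      exact ih (pre ++ [d]) (by simp [hpre]; exact fun hh => h hh.symm)

theorem splitAux_of_not_mem (c : Char) (pre l : List Char) (h : c ∉ l) :
    splitAux c pre l = [pre ++ l] := by
  induction l generalizing pre with
  | nil => simp [splitAux]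
  | cons d rest ih =>
    simp only [List.mem_cons, not_or] at h
    rw [splitAux, if_neg (fun hh => h.1 hh.symm), ih _ h.2]
    simp

theorem isIn_single (c : Char) (s : List Char) :
    PySem.Chars.isIn [c] s = true ↔ c ∈ s := by
  rw [PySem.Chars.isIn_iff_infix]
  constructor
  · exact fun h => h.subset (by simp)
  · intro h
    obtain ⟨t1, t2, rfl⟩ := List.append_of_mem h
    exact ⟨t1, t2, by simp⟩

-- the common character map of the digit substitution
def digChar (ch : Char) : Char :=
  if PySem.Chars.isdigit ch then PySem.List.pyGetD NUMKEYS ((ch.toNat : Int) - 48) ' ' else ch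

theorem pnLoop_gen (suf : List Char) : ∀ (pre : List Char) (b : Bool),
    (PySem.List.enumerate suf (pre.length : Int)).foldl
      (fun st p =>
        if PySem.Chars.isdigit p.2 then
          (PySem.List.slice st.1 none (some p.1) ++
             [PySem.List.pyGetD NUMKEYS ((p.2.toNat : Int) - 48) ' '] ++
             PySem.List.slice st.1 (some (p.1 + 1)) none, true)
        else st)
      (pre ++ suf, b)
    = (pre ++ suf.map digChar, b || suf.any PySem.Chars.isdigit) := by
  induction suf with
  | nil => simp [PySem.List.enumerate_nil]
  | cons d rest ih =>
    intro pre b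
    rw [PySem.List.enumerate_cons, List.foldl_cons]
    by_cases hd : PySem.Chars.isdigit d
    · rw [if_pos hd]
      have h1 : PySem.List.slice (pre ++ d :: rest) none (some (pre.length : Int)) = pre := by
        rw [PySem.List.slice_to_natCast]
        simp
      have h2 : PySem.List.slice (pre ++ d :: rest) (some ((pre.length : Int) + 1)) none = rest := by
        have : ((pre.length : Int) + 1) = (((pre.length + 1 : Nat)) : Int) := by push_cast; ring
        rw [this, PySem.List.slice_from_natCast]
        have : pre ++ d :: rest = (pre ++ [d]) ++ rest := by simp
        rw [this]
        have hl : pre.length + 1 = (pre ++ [d]).length := by simp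
        rw [hl, List.drop_left]
      simp only [h1, h2]
      have hgoal := ih (pre ++ [digChar d]) true
      have hlen : ((pre ++ [digChar d]).length : Int) = (pre.length : Int) + 1 := by simp
      rw [hlen] at hgoal
      have hdig : [PySem.List.pyGetD NUMKEYS ((d.toNat : Int) - 48) ' '] = [digChar d] := by
        simp [digChar, hd]
      rw [hdig]
      have : pre ++ [digChar d] ++ rest = (pre ++ [digChar d]) ++ rest := by simp
      rw [this, hgoal]
      simp [hd, digChar]
    · rw [if_neg hd]
      have hgoal := ih (pre ++ [d]) b
      have hlen : ((pre ++ [d]).length : Int) = (pre.length : Int) + 1 := by simp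
      rw [hlen] at hgoal
      have : pre ++ d :: rest = (pre ++ [d]) ++ rest := by simp
      rw [this, hgoal]
      have hfd : digChar d = d := by simp [digChar, hd]
      simp [hd, hfd]

theorem pnLoop_eq (s : List Char) (b : Bool) :
    pnLoop s b = (s.map digChar, b || s.any PySem.Chars.isdigit) := by
  have := pnLoop_gen s [] b
  simpa [pnLoop] using this

-- the normalized characters of a nonempty stroke (reference form shared by both sides)
def normChars (stroke : List Char) : List Char :=
  match stroke with
  | [] => []
  | c :: rest =>
    let leading : Bool := c = '#'
    let body := if leading then rest else c :: rest
    (if leading || body.any PySem.Chars.isdigit then ['#'] else []) ++ body.map digChar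

theorem pnPart_eq (stroke : List Char) (h : stroke ≠ []) :
    pnPart stroke = some (normChars stroke) := by
  match stroke with
  | c :: rest =>
    by_cases hc : c = '#'
    · subst hc
      simp only [pnPart, normChars, pnLoop_eq]
      simp
    · simp only [pnPart, normChars, pnLoop_eq]
      cases hany : (c :: rest).any PySem.Chars.isdigit with
      | false =>
        simp_all
        split <;> simp
      | true => simp_all

theorem mapM_pnPart (parts : List (List Char)) (h : ∀ p ∈ parts, p ≠ []) :
    parts.mapM pnPart = some (parts.map normChars) := by
  induction parts with
  | nil => simp
  | cons p rest ih =>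
    rw [List.mapM_cons, pnPart_eq p (h p (by simp)), ih (fun q hq => h q (by simp [hq]))]
    rfl

theorem LAST_literal : LAST = PySem.Dict.mk
    [('#', 0), ('S', 20), ('T', 19), ('K', 3), ('P', 15), ('W', 5), ('H', 6), ('R', 14),
     ('A', 8), ('O', 9), ('*', 10), ('E', 11), ('U', 12), ('F', 13), ('B', 16), ('L', 17),
     ('G', 18), ('D', 21), ('Z', 22)] := by
  decide

theorem getD_LAST_not_mem (c : Char) (h : c ∉ STENO) : LAST.getD c (-1) = -1 := by
  simp only [STENO, List.mem_cons, not_or] at h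
  obtain ⟨h1,h2,h3,h4,h5,h6,h7,h8,h9,h10,h11,h12,h13,h14,h15,h16,h17,h18,h19,h20,h21,h22,h23,-⟩ := h
  rw [LAST_literal]
  simp [PySem.Dict.getD, PySem.Dict.get?, PySem.Dict.get?_mk_cons,
    Ne.symm h1,Ne.symm h2,Ne.symm h3,Ne.symm h4,Ne.symm h5,Ne.symm h6,Ne.symm h7,Ne.symm h8,
    Ne.symm h9,Ne.symm h10,Ne.symm h11,Ne.symm h12,Ne.symm h13,Ne.symm h14,Ne.symm h15,
    Ne.symm h16,Ne.symm h17,Ne.symm h18,Ne.symm h19,Ne.symm h20,Ne.symm h21,Ne.symm h22,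
    Ne.symm h23]

-- per character of STENO_ORDER: A's find-from-m equals B's guarded walk, with bounds in the hit case
theorem bfind_mem (c : Char) (hc : c ∈ STENO) : ∀ n : Nat, n < 24 →
    (PySem.Chars.findFrom STENO [c] (n : Int) none =
      (if LAST.getD c (-1) ≥ (n : Int) then walkAux (STENO.drop ((n : Int)).toNat) (n : Int) c
       else -1)) ∧
    (LAST.getD c (-1) ≥ (n : Int) →
      0 ≤ walkAux (STENO.drop ((n : Int)).toNat) (n : Int) c ∧
        walkAux (STENO.drop ((n : Int)).toNat) (n : Int) c ≤ 22) := by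
  fin_cases hc <;> decide

theorem step_eq (st : Int × List Int) (c : Char) (hc : c ≠ '/')
    (h0 : 0 ≤ st.1) (h23 : st.1 ≤ 23) :
    stepA st c = emit st c ∧ 0 ≤ (emit st c).1 ∧ (emit st c).1 ≤ 23 := by
  by_cases hdash : c = '-'
  · subst hdash
    have h1 : emit st '-' = (MIDDLE + 1, st.2) := rfl
    exact ⟨rfl, by rw [h1]; show (0:Int) ≤ MIDDLE + 1; decide,
      by rw [h1]; show MIDDLE + 1 ≤ (23:Int); decide⟩
  · rw [stepA, emit, bStep, if_neg hdash, if_neg hdash]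
    simp only [if_neg hc]
    by_cases hmem : c ∈ STENO
    · obtain ⟨n, hn⟩ := Int.eq_ofNat_of_zero_le h0
      have hlt : n < 24 := by omega
      obtain ⟨hfind, hbnd⟩ := bfind_mem c hmem n hlt
      rw [hn, hfind]
      simp only [Int.toNat_natCast] at hfind hbnd ⊢
      by_cases hg : LAST.getD c (-1) ≥ (n : Int)
      · obtain ⟨hb0, hb22⟩ := hbnd hg
        rw [if_pos hg, if_pos hg]
        have hne : walkAux (STENO.drop n) (n : Int) c ≠ -1 := by omega
        refine ⟨by simp [hne], by simp; omega, by simp; omega⟩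
      · rw [if_neg hg, if_neg hg]
        refine ⟨by simp, by simp, by simp; omega⟩
    · have hgetd : LAST.getD c (-1) = -1 := getD_LAST_not_mem c hmem
      have hg : ¬ LAST.getD c (-1) ≥ st.1 := by rw [hgetd]; omega
      rw [if_neg hg]
      have hm : st.1 = ((st.1.toNat : Nat) : Int) := (Int.toNat_of_nonneg h0).symm
      have hk : st.1.toNat ≤ STENO.length := by simp [STENO]; omega
      have hfind : PySem.Chars.findFrom STENO [c] st.1 none = -1 := by
        rw [hm, PySem.Chars.findFrom_natCast STENO [c] st.1.toNat hk]
        have : PySem.Chars.find (STENO.drop st.1.toNat) [c] = -1 := by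
          rw [PySem.Chars.find_eq_neg_one_iff]
          intro hinf
          exact hmem (List.mem_of_mem_drop (hinf.subset (by simp)))
        simp [this]
      rw [hfind]
      exact ⟨by simp, h0, h23⟩

theorem foldl_step_eq (cs : List Char) : ∀ (st : Int × List Int),
    (∀ ch ∈ cs, ch ≠ '/') → 0 ≤ st.1 → st.1 ≤ 23 →
    cs.foldl stepA st = cs.foldl emit st ∧
      0 ≤ (cs.foldl emit st).1 ∧ (cs.foldl emit st).1 ≤ 23 := by
  induction cs with
  | nil => exact fun st _ h0 h23 => ⟨rfl, h0, h23⟩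
  | cons d rest ih =>
    intro st hns h0 h23
    obtain ⟨heq, hb0, hb23⟩ := step_eq st d (hns d (by simp)) h0 h23
    rw [List.foldl_cons, List.foldl_cons, heq]
    exact ih (emit st d) (fun ch hch => hns ch (by simp [hch])) hb0 hb23

theorem digChar_ne_slash (b : Char) (hb : b ≠ '/') : digChar b ≠ '/' := by
  unfold digChar
  by_cases hd : PySem.Chars.isdigit b
  · rw [if_pos hd]
    unfold PySem.List.pyGetD
    cases h : PySem.List.pyGet? NUMKEYS ((b.toNat : Int) - 48) with
    | none => simp
    | some x =>
      have hm := PySem.List.mem_of_pyGet?_eq_some NUMKEYS h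
      have hnk : ∀ y ∈ NUMKEYS, y ≠ '/' := by intro y hy; fin_cases hy <;> simp
      simpa using hnk x hm
  · rwa [if_neg hd]

-- B's stroke pass equals A's scan of the normalized characters, from a fresh pointer
theorem stroke_eq (stroke : List Char) (hne : stroke ≠ []) (hns : '/' ∉ stroke) (acc : List Int) :
    bStroke acc stroke = some (((normChars stroke).foldl stepA (0, acc)).2) ∧
      0 ≤ ((normChars stroke).foldl stepA (0, acc)).1 ∧
      ((normChars stroke).foldl stepA (0, acc)).1 ≤ 23 := by
  match stroke with
  | c :: rest =>
    simp only [bStroke, normChars]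
    generalize hB : (if (c = '#' : Bool) then rest else c :: rest) = body
    have hbody : '/' ∉ body := by
      rw [← hB]
      split
      · exact fun hm => hns (List.mem_cons_of_mem _ hm)
      · exact hns
    have hdg : ∀ st : Int × List Int,
        body.foldl (fun st c =>
          emit st (if PySem.Chars.isdigit c then
                     PySem.List.pyGetD NUMKEYS ((c.toNat : Int) - 48) ' '
                   else c)) st
        = (body.map digChar).foldl emit st := by
      intro st
      rw [List.foldl_map]
      simp [digChar]
    have hnosl : ∀ ch ∈ body.map digChar, ch ≠ '/' := by
      intro ch hch
      obtain ⟨b, hb, rfl⟩ := List.mem_map.mp hch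
      exact digChar_ne_slash b (fun hbe => hbody (hbe ▸ hb))
    cases hn : ((c = '#' : Bool) || body.any PySem.Chars.isdigit) with
    | true =>
      simp only [if_true, List.singleton_append, List.foldl_cons]
      obtain ⟨heq0, h00, h023⟩ := step_eq (0, acc) '#' (by decide) (by omega) (by omega)
      obtain ⟨heq, hb0, hb23⟩ := foldl_step_eq (body.map digChar) (emit (0, acc) '#')
        hnosl h00 h023
      rw [heq0, heq, hdg]
      exact ⟨rfl, hb0, hb23⟩
    | false =>
      simp only [if_neg (by decide : ¬ ((false : Bool) = true)), List.nil_append]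
      obtain ⟨heq, hb0, hb23⟩ := foldl_step_eq (body.map digChar) (0, acc)
        hnosl (by omega) (by omega)
      rw [heq, hdg]
      exact ⟨rfl, hb0, hb23⟩

theorem find_slash : PySem.Chars.find STENO ['/'] = -1 := by decide

theorem stepA_slash (st : Int × List Int) : stepA st '/' = (0, st.2 ++ [-1]) := by
  simp [stepA, find_slash]

theorem join_eq_flatMap (parts : List (List Char)) :
    PySem.Chars.join ['/'] parts =
      (match parts with
       | [] => []
       | a :: t => a ++ t.flatMap (fun q => '/' :: q)) := by
  match parts with
  | [] => exact PySem.Chars.join_nil ['/']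
  | a :: t =>
    induction t generalizing a with
    | nil => simp [PySem.Chars.join_singleton]
    | cons b t' ih =>
      rw [PySem.Chars.join_cons_cons, ih b]
      simp

theorem loop_rest (parts : List (List Char)) : ∀ (st : Int × List Int),
    (∀ p ∈ parts, p ≠ [] ∧ '/' ∉ p) →
    0 ≤ st.1 → st.1 ≤ 23 →
    parts.foldl bOuter (some (false, st.2)) =
      some (false, (((parts.map normChars).flatMap (fun q => '/' :: q)).foldl stepA st).2) ∧
    0 ≤ (((parts.map normChars).flatMap (fun q => '/' :: q)).foldl stepA st).1 ∧
    (((parts.map normChars).flatMap (fun q => '/' :: q)).foldl stepA st).1 ≤ 23 := by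
  induction parts with
  | nil => exact fun st _ h0 h23 => ⟨rfl, h0, h23⟩
  | cons p rest ih =>
    intro st hok h0 h23
    obtain ⟨hpne, hpns⟩ := hok p (by simp)
    simp only [List.map_cons, List.flatMap_cons, List.foldl_cons, List.foldl_append]
    rw [stepA_slash]
    obtain ⟨hstroke, hs0, hs23⟩ := stroke_eq p hpne hpns (st.2 ++ [-1])
    have hb : bOuter (some (false, st.2)) p =
        some (false, ((normChars p).foldl stepA (0, st.2 ++ [-1])).2) := by
      simp [bOuter, hstroke]
    rw [hb]
    have := ih ((normChars p).foldl stepA (0, st.2 ++ [-1]))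
      (fun q hq => hok q (by simp [hq])) hs0 hs23
    simpa using this

-- ===== VERDICT (by name: the statement is the Claim_ definition above) =====
theorem steno_indices_spec : Claim_equal_steno_indices := by
  intro key _ hpre
  unfold Spec_steno_indices steno_indices steno_indices_alt
  unfold Pre_steno_indices at hpre
  rw [splitOn_eq] at hpre ⊢
  have hne : ∀ p ∈ splitAux '/' [] key.toList, p ≠ [] :=
    fun p hp hpe => hpre (hpe ▸ hp)
  have hnosep : ∀ p ∈ splitAux '/' [] key.toList, '/' ∉ p :=
    splitAux_no_sep '/' [] key.toList (by simp)
  by_cases hin : PySem.Chars.isIn ['/'] key.toList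
  · -- key contains '/'
    unfold pnAll
    rw [if_pos hin, splitOn_eq, mapM_pnPart _ hne]
    simp only [Option.map_some]
    match hparts : splitAux '/' [] key.toList with
    | [] => exact absurd hparts (splitAux_ne_nil _ _ _)
    | p0 :: rest =>
      rw [hparts] at hne hnosep
      rw [join_eq_flatMap]
      simp only [List.map_cons]
      have hfm : (rest.map normChars).flatMap (fun q => '/' :: q) =
          (rest.map normChars).flatMap (fun q => '/' :: q) := rfl
      rw [List.foldl_cons, List.foldl_append]
      obtain ⟨hstroke0, h00, h023⟩ := stroke_eq p0 (hne p0 (by simp)) (hnosep p0 (by simp)) []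
      have hb0 : bOuter (some (true, ([] : List Int))) p0 =
          some (false, ((normChars p0).foldl stepA (0, ([] : List Int))).2) := by
        simp [bOuter, hstroke0]
      rw [hb0]
      obtain ⟨hrest, -, -⟩ := loop_rest rest ((normChars p0).foldl stepA (0, ([] : List Int)))
        (fun q hq => ⟨hne q (by simp [hq]), hnosep q (by simp [hq])⟩) h00 h023
      rw [hrest]
      rfl
  · -- no '/' in key
    have hns : '/' ∉ key.toList := fun hmem => hin ((isIn_single '/' key.toList).mpr hmem)
    have hsingle : splitAux '/' [] key.toList = [key.toList] :=
      splitAux_of_not_mem '/' [] key.toList hns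
    have hknil : key.toList ≠ [] := by
      intro hk
      exact hpre (by rw [hsingle]; simp [hk])
    unfold pnAll
    rw [if_neg hin, pnPart_eq key.toList hknil]
    obtain ⟨hstroke, -, -⟩ := stroke_eq key.toList hknil hns []
    rw [hsingle]
    simp only [List.foldl_cons, List.foldl_nil]
    have hb : bOuter (some (true, ([] : List Int))) key.toList =
        some (false, ((normChars key.toList).foldl stepA (0, ([] : List Int))).2) := by
      simp [bOuter, hstroke]
    rw [hb]
    rfl
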